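-- pv_equiv track=rewrite | github.com/MrAgrawal1301/Github_Project_aiml | task3_individual_repo_risk.py | get_risk_score
-- ===== SOURCE A (Python) =====
-- def get_risk_score(stale_time):
--     risk_score = {
--         "Low Risk": 3,
--         "Medium Risk": 5,
--         "High Risk": 8,
--         "Critical Risk": 10,
--     }
--     level_of_risk = None
--     for a,b in risk_score.items():
--         if stale_time<b:
--             level_of_risk = f"{a} --> The Stale branch is {stale_time} days old"
--             break
--         else:
--             level_of_risk = f"Critical Risk --> The Stale branch is {stale_time} days old"
--     return level_of_risk
-- ===== SOURCE B (Python) =====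
-- import bisect
--
-- _THRESHOLDS = [3, 5, 8]
-- _LABELS = ["Low Risk", "Medium Risk", "High Risk", "Critical Risk"]
--
-- def get_risk_score(stale_time):
--     label = _LABELS[bisect.bisect_right(_THRESHOLDS, stale_time)]
--     return f"{label} --> The Stale branch is {stale_time} days old"
-- ===== Notes on version B (the rewrite author's own statement) =====
-- stated objective: idiomatic
-- what changed: Replaces the dict-iteration loop with break/else and duplicated f-strings by a sorted threshold table looked up with bisect.bisect_right and a single f-string.
import Mathlib
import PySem

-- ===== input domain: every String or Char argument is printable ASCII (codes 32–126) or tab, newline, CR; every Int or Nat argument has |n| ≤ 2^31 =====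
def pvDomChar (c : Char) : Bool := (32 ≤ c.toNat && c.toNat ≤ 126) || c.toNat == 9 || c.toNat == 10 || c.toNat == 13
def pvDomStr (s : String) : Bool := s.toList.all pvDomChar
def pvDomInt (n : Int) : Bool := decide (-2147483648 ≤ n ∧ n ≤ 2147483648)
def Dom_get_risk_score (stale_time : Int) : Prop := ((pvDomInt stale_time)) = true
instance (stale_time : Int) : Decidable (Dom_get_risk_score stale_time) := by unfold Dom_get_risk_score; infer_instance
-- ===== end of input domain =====

-- B replaces A's dict-iteration loop (with break/else and duplicated f-strings) by a
-- sorted threshold table looked up with bisect_right and a single format string (idiomatic).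

-- ===== PORT A =====
-- the for-loop over risk_score.items() with break; `acc` is level_of_risk
def pvALoop (stale_time : Int) : List (String × Int) → Option String → Option String
  | [], acc => acc
  | (a, b) :: rest, _ =>
    if stale_time < b then
      some (a ++ " --> The Stale branch is " ++ PySem.Int.toStr stale_time ++ " days old")
    else
      pvALoop stale_time rest
        (some ("Critical Risk --> The Stale branch is " ++ PySem.Int.toStr stale_time ++ " days old"))

def get_risk_score (stale_time : Int) : String :=
  -- the dict literal has four distinct keys, so items() is this list; the loop body always
  -- assigns, and the list is non-empty, so the Python never returns None: getD "" is unreachable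
  (pvALoop stale_time
      [("Low Risk", 3), ("Medium Risk", 5), ("High Risk", 8), ("Critical Risk", 10)]
      none).getD ""

-- ===== PORT B =====
def pvThresholds : List Int := [3, 5, 8]
def pvLabels : List String := ["Low Risk", "Medium Risk", "High Risk", "Critical Risk"]

def get_risk_score_alt (stale_time : Int) : String :=
  let label := (PySem.List.pyGet? pvLabels
      ((PySem.List.bisectRight pvThresholds stale_time : Nat) : Int)).getD ""
  label ++ " --> The Stale branch is " ++ PySem.Int.toStr stale_time ++ " days old"

-- ===== PRECONDITION & SPEC =====
def Spec_get_risk_score (stale_time : Int) (out : String) : Prop := out = get_risk_score_alt stale_time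
instance (stale_time : Int) (out : String) : Decidable (Spec_get_risk_score stale_time out) := by unfold Spec_get_risk_score; infer_instance

-- ===== CLAIM (what is proved, stated in full; the proofs are below) =====
def Claim_equal_get_risk_score : Prop := ∀ (stale_time : Int), Dom_get_risk_score stale_time → Spec_get_risk_score stale_time (get_risk_score stale_time)

-- ===== LEMMAS AND PROOFS =====
theorem pvBisect_eq (t : Int) :
    PySem.List.bisectRight pvThresholds t =
      if t < 3 then 0 else if t < 5 then 1 else if t < 8 then 2 else 3 := by
  obtain ⟨hle, hlt, hge⟩ :=
    PySem.List.bisectRight_spec [3, 5, 8] t (by decide)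
  show PySem.List.bisectRight [3, 5, 8] t = _
  set k := PySem.List.bisectRight [3, 5, 8] t with hk
  have a0 : 0 < k → (3:Int) ≤ t := fun h => by simpa using hlt 0 (by simp) h
  have a1 : 1 < k → (5:Int) ≤ t := fun h => by simpa using hlt 1 (by simp) h
  have a2 : 2 < k → (8:Int) ≤ t := fun h => by simpa using hlt 2 (by simp) h
  have b0 : k ≤ 0 → t < 3 := fun h => by simpa using hge 0 (by simp) h
  have b1 : k ≤ 1 → t < 5 := fun h => by simpa using hge 1 (by simp) h
  have b2 : k ≤ 2 → t < 8 := fun h => by simpa using hge 2 (by simp) h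
  have hle3 : k ≤ 3 := by simpa using hle
  split_ifs <;> omega

-- ===== VERDICT (by name: the statement is the Claim_ definition above) =====
theorem get_risk_score_spec : Claim_equal_get_risk_score := by
  intro t _
  show get_risk_score t = get_risk_score_alt t
  unfold get_risk_score get_risk_score_alt
  rw [pvBisect_eq]
  by_cases h3 : t < 3 <;> by_cases h5 : t < 5 <;> by_cases h8 : t < 8 <;> by_cases h10 : t < 10 <;>
    simp [pvALoop, pvLabels, PySem.List.pyGet?, PySem.List.pyIdx?, h3, h5, h8, h10]
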